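-- pv_equiv track=rewrite | github.com/alvarado-transfer-pathways-2026/transfer-agreements-analysis | pathway_generator/pathway_generator.py | _get_course_category
-- ===== SOURCE A (Python) =====
-- from typing import Dict, List, Set, Tuple, Optional, Any
--
-- def _get_course_category(course_code: str, course_data: Dict) -> str:
--     """Get the category of a course for balancing purposes."""
--     tags = course_data.get("tags", [])
--     subject = course_code.split()[0].upper() if " " in course_code else ""
--
--     if any(tag in tags for tag in ["IGETC-1A", "IGETC-1B", "7CP-English"]):
--         return "english"
--     elif any(tag in tags for tag in ["IGETC-2", "7CP-Math", "GE-B4"]) or subject == "MATH":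
--         return "math"
--     elif "Major Prep" in tags or subject in ["CS", "CIS", "COMP"]:
--         return "major"
--     elif any(tag in tags for tag in ["IGETC-5A", "IGETC-5B", "IGETC-5C", "7CP-Science"]):
--         return "science"
--     elif any(tag in tags for tag in ["IGETC-3A", "7CP-Arts"]):
--         return "arts"
--     elif any(tag in tags for tag in ["IGETC-4", "7CP-Social"]):
--         return "social"
--     else:
--         return "other"
-- ===== SOURCE B (Python) =====
-- # B: data-driven single pass — one dict maps each tag to (priority, category),
-- # a fold keeps the lowest-priority rule; priority order reproduces A's cascade.
-- _TAG_RULE = {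
--     "IGETC-1A": (0, "english"), "IGETC-1B": (0, "english"), "7CP-English": (0, "english"),
--     "IGETC-2": (1, "math"), "7CP-Math": (1, "math"), "GE-B4": (1, "math"),
--     "Major Prep": (2, "major"),
--     "IGETC-5A": (3, "science"), "IGETC-5B": (3, "science"),
--     "IGETC-5C": (3, "science"), "7CP-Science": (3, "science"),
--     "IGETC-3A": (4, "arts"), "7CP-Arts": (4, "arts"),
--     "IGETC-4": (5, "social"), "7CP-Social": (5, "social"),
-- }
-- _SUBJ_RULE = {"MATH": (1, "math"), "CS": (2, "major"), "CIS": (2, "major"), "COMP": (2, "major")}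
--
-- def _get_course_category(course_code: str, course_data) -> str:
--     tags = course_data.get("tags", [])
--     subject = course_code.split()[0].upper() if " " in course_code else ""
--     best = _SUBJ_RULE.get(subject, (6, "other"))
--     for t in tags:
--         r = _TAG_RULE.get(t, (6, "other"))
--         if r[0] < best[0]:
--             best = r
--     return best[1]
-- ===== Notes on version B (the rewrite author's own statement) =====
-- stated objective: alternative
-- what changed: Replaces A's six-branch if/elif cascade of membership tests by a data-driven design: one dict mapping each tag (and one for subjects) to a (priority, category) pair, and a single minimising fold over the course's tags that keeps the lowest-priority rule, so the first-match priority order of the cascade becomes a minimum computation.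
import Mathlib
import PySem

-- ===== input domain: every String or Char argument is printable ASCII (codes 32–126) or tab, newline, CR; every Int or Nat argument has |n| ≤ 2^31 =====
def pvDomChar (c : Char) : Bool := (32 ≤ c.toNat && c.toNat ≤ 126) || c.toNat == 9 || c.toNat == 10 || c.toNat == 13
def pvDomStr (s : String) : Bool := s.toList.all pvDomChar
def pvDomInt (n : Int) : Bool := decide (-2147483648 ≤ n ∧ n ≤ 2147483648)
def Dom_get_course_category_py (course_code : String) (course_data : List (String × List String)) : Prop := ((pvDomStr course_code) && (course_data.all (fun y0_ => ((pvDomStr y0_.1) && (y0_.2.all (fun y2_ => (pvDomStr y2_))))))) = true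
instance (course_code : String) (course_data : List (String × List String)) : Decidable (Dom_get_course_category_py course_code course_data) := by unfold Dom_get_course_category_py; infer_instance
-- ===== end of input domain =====

-- B replaces A's if/elif cascade by one tag→(priority, category) table and a single
-- minimising fold over the course's tags (objective: alternative, data-driven decomposition).

-- ===== PORT A =====
-- subject = course_code.split()[0].upper(); the [0] raises IndexError when split() is empty
-- (excluded by Pre_), so the `.getD ""` below is only ever taken outside Pre_.
def get_course_category_py (course_code : String) (course_data : List (String × List String)) : String :=
  let tags := (PySem.Dict.mk course_data).getD "tags" []
  let subject := if PySem.Str.isIn " " course_code then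
      PySem.Str.upper ((PySem.List.pyGet? (PySem.Str.split₀ course_code) 0).getD "")
    else ""
  if ["IGETC-1A", "IGETC-1B", "7CP-English"].any (fun tag => tags.contains tag) then "english"
  else if (["IGETC-2", "7CP-Math", "GE-B4"].any (fun tag => tags.contains tag)) || subject == "MATH" then "math"
  else if tags.contains "Major Prep" || ["CS", "CIS", "COMP"].contains subject then "major"
  else if ["IGETC-5A", "IGETC-5B", "IGETC-5C", "7CP-Science"].any (fun tag => tags.contains tag) then "science"
  else if ["IGETC-3A", "7CP-Arts"].any (fun tag => tags.contains tag) then "arts"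
  else if ["IGETC-4", "7CP-Social"].any (fun tag => tags.contains tag) then "social"
  else "other"

-- ===== PORT B =====
-- the dict literal _TAG_RULE of Source B (its pair list, wrapped in PySem.Dict below)
def tagTbl : List (String × (Int × String)) :=
  [("IGETC-1A", (0, "english")), ("IGETC-1B", (0, "english")), ("7CP-English", (0, "english")),
   ("IGETC-2", (1, "math")), ("7CP-Math", (1, "math")), ("GE-B4", (1, "math")),
   ("Major Prep", (2, "major")),
   ("IGETC-5A", (3, "science")), ("IGETC-5B", (3, "science")),
   ("IGETC-5C", (3, "science")), ("7CP-Science", (3, "science")),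
   ("IGETC-3A", (4, "arts")), ("7CP-Arts", (4, "arts")),
   ("IGETC-4", (5, "social")), ("7CP-Social", (5, "social"))]
-- the dict literal _SUBJ_RULE of Source B
def subjTbl : List (String × (Int × String)) :=
  [("MATH", (1, "math")), ("CS", (2, "major")), ("CIS", (2, "major")), ("COMP", (2, "major"))]

def pvTagRule : PySem.Dict String (Int × String) := PySem.Dict.mk tagTbl
def pvSubjRule : PySem.Dict String (Int × String) := PySem.Dict.mk subjTbl

def get_course_category_py_alt (course_code : String) (course_data : List (String × List String)) : String :=
  let tags := (PySem.Dict.mk course_data).getD "tags" []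
  let subject := if PySem.Str.isIn " " course_code then
      PySem.Str.upper ((PySem.List.pyGet? (PySem.Str.split₀ course_code) 0).getD "")
    else ""
  let best := tags.foldl
    (fun best t =>
      let r := pvTagRule.getD t (6, "other")
      if r.1 < best.1 then r else best)
    (pvSubjRule.getD subject (6, "other"))
  best.2

-- ===== PRECONDITION & SPEC =====
-- Pre_ excludes exactly the inputs where A raises IndexError: course_code contains a space
-- but consists only of whitespace, so course_code.split() is empty and split()[0] raises
-- (B raises there too).
def Pre_get_course_category_py (course_code : String) (course_data : List (String × List String)) : Prop :=
  PySem.Str.isIn " " course_code = true → PySem.Str.split₀ course_code ≠ []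
instance (course_code : String) (course_data : List (String × List String)) : Decidable (Pre_get_course_category_py course_code course_data) := by unfold Pre_get_course_category_py; infer_instance

def pvWitness_get_course_category_py : String × (List (String × List String)) :=
  ("MATH 1A", [("tags", ["IGETC-2", "Major Prep"])])

def Spec_get_course_category_py (course_code : String) (course_data : List (String × List String)) (out : String) : Prop := out = get_course_category_py_alt course_code course_data
instance (course_code : String) (course_data : List (String × List String)) (out : String) : Decidable (Spec_get_course_category_py course_code course_data out) := by unfold Spec_get_course_category_py; infer_instance

-- ===== CLAIM (what is proved, stated in full; the proofs are below) =====
def Claim_equal_get_course_category_py : Prop := ∀ (course_code : String) (course_data : List (String × List String)), Dom_get_course_category_py course_code course_data → Pre_get_course_category_py course_code course_data → Spec_get_course_category_py course_code course_data (get_course_category_py course_code course_data)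

-- ===== LEMMAS AND PROOFS =====

def lookupD {ν : Type} (l : List (String × ν)) (t : String) (d : ν) : ν :=
  match l with
  | [] => d
  | (k, v) :: r => if k == t then v else lookupD r t d

lemma lookupD_cons_ne {ν : Type} {k : String} (v : ν) (r : List (String × ν)) {t : String} (d : ν)
    (h : (k == t) = false) : lookupD ((k, v) :: r) t d = lookupD r t d := by
  simp [lookupD, h]

lemma getD_mk_eq_lookupD {ν : Type} (l : List (String × ν)) (t : String) (d : ν) :
    (PySem.Dict.mk l).getD t d = lookupD l t d := by
  induction l with
  | nil => rfl
  | cons p r ih =>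
      obtain ⟨k, v⟩ := p
      rw [PySem.Dict.getD_eq_get?_getD, PySem.Dict.get?_mk_cons]
      by_cases h : (k == t) = true
      · simp [lookupD, h]
      · simp only [Bool.not_eq_true] at h
        rw [if_neg (by simp [h]), ← PySem.Dict.getD_eq_get?_getD, ih, lookupD_cons_ne _ _ _ h]

def pvCat (n : Int) : String :=
  if n = 0 then "english" else if n = 1 then "math" else if n = 2 then "major"
  else if n = 3 then "science" else if n = 4 then "arts" else if n = 5 then "social" else "other"
def pvTp (t : String) : Int := (lookupD tagTbl t (6, "other")).1
def pvSp (t : String) : Int := (lookupD subjTbl t (6, "other")).1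

lemma tag_master (t : String) :
    lookupD tagTbl t (6, "other") = (pvTp t, pvCat (pvTp t)) ∧ 0 ≤ pvTp t ∧ pvTp t ≤ 6 ∧
    (pvTp t = 0 ↔ t ∈ ["IGETC-1A", "IGETC-1B", "7CP-English"]) ∧
    (pvTp t = 1 ↔ t ∈ ["IGETC-2", "7CP-Math", "GE-B4"]) ∧
    (pvTp t = 2 ↔ t = "Major Prep") ∧
    (pvTp t = 3 ↔ t ∈ ["IGETC-5A", "IGETC-5B", "IGETC-5C", "7CP-Science"]) ∧
    (pvTp t = 4 ↔ t ∈ ["IGETC-3A", "7CP-Arts"]) ∧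
    (pvTp t = 5 ↔ t ∈ ["IGETC-4", "7CP-Social"]) := by
  by_cases h1 : t = "IGETC-1A"
  · subst h1; decide
  by_cases h2 : t = "IGETC-1B"
  · subst h2; decide
  by_cases h3 : t = "7CP-English"
  · subst h3; decide
  by_cases h4 : t = "IGETC-2"
  · subst h4; decide
  by_cases h5 : t = "7CP-Math"
  · subst h5; decide
  by_cases h6 : t = "GE-B4"
  · subst h6; decide
  by_cases h7 : t = "Major Prep"
  · subst h7; decide
  by_cases h8 : t = "IGETC-5A"
  · subst h8; decide
  by_cases h9 : t = "IGETC-5B"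
  · subst h9; decide
  by_cases h10 : t = "IGETC-5C"
  · subst h10; decide
  by_cases h11 : t = "7CP-Science"
  · subst h11; decide
  by_cases h12 : t = "IGETC-3A"
  · subst h12; decide
  by_cases h13 : t = "7CP-Arts"
  · subst h13; decide
  by_cases h14 : t = "IGETC-4"
  · subst h14; decide
  by_cases h15 : t = "7CP-Social"
  · subst h15; decide
  have n1 : ("IGETC-1A" == t) = false := beq_eq_false_iff_ne.mpr (fun e => h1 e.symm)
  have n2 : ("IGETC-1B" == t) = false := beq_eq_false_iff_ne.mpr (fun e => h2 e.symm)
  have n3 : ("7CP-English" == t) = false := beq_eq_false_iff_ne.mpr (fun e => h3 e.symm)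
  have n4 : ("IGETC-2" == t) = false := beq_eq_false_iff_ne.mpr (fun e => h4 e.symm)
  have n5 : ("7CP-Math" == t) = false := beq_eq_false_iff_ne.mpr (fun e => h5 e.symm)
  have n6 : ("GE-B4" == t) = false := beq_eq_false_iff_ne.mpr (fun e => h6 e.symm)
  have n7 : ("Major Prep" == t) = false := beq_eq_false_iff_ne.mpr (fun e => h7 e.symm)
  have n8 : ("IGETC-5A" == t) = false := beq_eq_false_iff_ne.mpr (fun e => h8 e.symm)
  have n9 : ("IGETC-5B" == t) = false := beq_eq_false_iff_ne.mpr (fun e => h9 e.symm)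
  have n10 : ("IGETC-5C" == t) = false := beq_eq_false_iff_ne.mpr (fun e => h10 e.symm)
  have n11 : ("7CP-Science" == t) = false := beq_eq_false_iff_ne.mpr (fun e => h11 e.symm)
  have n12 : ("IGETC-3A" == t) = false := beq_eq_false_iff_ne.mpr (fun e => h12 e.symm)
  have n13 : ("7CP-Arts" == t) = false := beq_eq_false_iff_ne.mpr (fun e => h13 e.symm)
  have n14 : ("IGETC-4" == t) = false := beq_eq_false_iff_ne.mpr (fun e => h14 e.symm)
  have n15 : ("7CP-Social" == t) = false := beq_eq_false_iff_ne.mpr (fun e => h15 e.symm)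
  have hval : lookupD tagTbl t (6, "other") = (6, "other") := by
    simp only [tagTbl]
    rw [lookupD_cons_ne _ _ _ n1, lookupD_cons_ne _ _ _ n2, lookupD_cons_ne _ _ _ n3, lookupD_cons_ne _ _ _ n4, lookupD_cons_ne _ _ _ n5, lookupD_cons_ne _ _ _ n6, lookupD_cons_ne _ _ _ n7, lookupD_cons_ne _ _ _ n8, lookupD_cons_ne _ _ _ n9, lookupD_cons_ne _ _ _ n10, lookupD_cons_ne _ _ _ n11, lookupD_cons_ne _ _ _ n12, lookupD_cons_ne _ _ _ n13, lookupD_cons_ne _ _ _ n14, lookupD_cons_ne _ _ _ n15]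
    all_goals rfl
  have htp : pvTp t = 6 := by rw [pvTp, hval]
  refine ⟨by rw [hval, htp] <;> decide, by rw [htp] <;> decide, by rw [htp] <;> decide, ?_, ?_, ?_, ?_, ?_, ?_⟩
  all_goals
    rw [htp]
    constructor
    · intro h; exact absurd h (by decide)
    · intro h
      first
        | (fin_cases h <;> contradiction)
        | (subst h; contradiction)

lemma subj_master (t : String) :
    lookupD subjTbl t (6, "other") = (pvSp t, pvCat (pvSp t)) ∧
    (pvSp t = 1 ∨ pvSp t = 2 ∨ pvSp t = 6) ∧
    (pvSp t = 1 ↔ t = "MATH") ∧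
    (pvSp t = 2 ↔ t ∈ ["CS", "CIS", "COMP"]) := by
  by_cases h1 : t = "MATH"
  · subst h1; decide
  by_cases h2 : t = "CS"
  · subst h2; decide
  by_cases h3 : t = "CIS"
  · subst h3; decide
  by_cases h4 : t = "COMP"
  · subst h4; decide
  have n1 : ("MATH" == t) = false := beq_eq_false_iff_ne.mpr (fun e => h1 e.symm)
  have n2 : ("CS" == t) = false := beq_eq_false_iff_ne.mpr (fun e => h2 e.symm)
  have n3 : ("CIS" == t) = false := beq_eq_false_iff_ne.mpr (fun e => h3 e.symm)
  have n4 : ("COMP" == t) = false := beq_eq_false_iff_ne.mpr (fun e => h4 e.symm)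
  have hval : lookupD subjTbl t (6, "other") = (6, "other") := by
    simp only [subjTbl]
    rw [lookupD_cons_ne _ _ _ n1, lookupD_cons_ne _ _ _ n2, lookupD_cons_ne _ _ _ n3, lookupD_cons_ne _ _ _ n4]
    all_goals rfl
  have htp : pvSp t = 6 := by rw [pvSp, hval]
  refine ⟨by rw [hval, htp] <;> decide, by rw [htp] <;> decide, ?_, ?_⟩
  all_goals
    rw [htp]
    constructor
    · intro h; exact absurd h (by decide)
    · intro h
      first
        | (fin_cases h <;> contradiction)
        | (subst h; contradiction)

lemma tagRule_canon (t : String) : pvTagRule.getD t (6, "other") = (pvTp t, pvCat (pvTp t)) := by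
  rw [pvTagRule, getD_mk_eq_lookupD]; exact (tag_master t).1

lemma subjRule_canon (s : String) : pvSubjRule.getD s (6, "other") = (pvSp s, pvCat (pvSp s)) := by
  rw [pvSubjRule, getD_mk_eq_lookupD]; exact (subj_master s).1

lemma tp_range (t : String) : 0 ≤ pvTp t ∧ pvTp t ≤ 6 :=
  ⟨(tag_master t).2.1, (tag_master t).2.2.1⟩

lemma sp_cases (s : String) : pvSp s = 1 ∨ pvSp s = 2 ∨ pvSp s = 6 := (subj_master s).2.1

lemma tp_eq_zero_iff (t : String) : pvTp t = 0 ↔ t ∈ ["IGETC-1A", "IGETC-1B", "7CP-English"] :=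
  (tag_master t).2.2.2.1
lemma tp_eq_one_iff (t : String) : pvTp t = 1 ↔ t ∈ ["IGETC-2", "7CP-Math", "GE-B4"] :=
  (tag_master t).2.2.2.2.1
lemma tp_eq_two_iff (t : String) : pvTp t = 2 ↔ t = "Major Prep" :=
  (tag_master t).2.2.2.2.2.1
lemma tp_eq_three_iff (t : String) : pvTp t = 3 ↔ t ∈ ["IGETC-5A", "IGETC-5B", "IGETC-5C", "7CP-Science"] :=
  (tag_master t).2.2.2.2.2.2.1
lemma tp_eq_four_iff (t : String) : pvTp t = 4 ↔ t ∈ ["IGETC-3A", "7CP-Arts"] :=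
  (tag_master t).2.2.2.2.2.2.2.1
lemma tp_eq_five_iff (t : String) : pvTp t = 5 ↔ t ∈ ["IGETC-4", "7CP-Social"] :=
  (tag_master t).2.2.2.2.2.2.2.2
lemma sp_eq_one_iff (s : String) : pvSp s = 1 ↔ s = "MATH" := (subj_master s).2.2.1
lemma sp_eq_two_iff (s : String) : pvSp s = 2 ↔ s ∈ ["CS", "CIS", "COMP"] := (subj_master s).2.2.2

-- the scalar min-fold underlying B's pair fold
def pvM (tags : List String) (i : Int) : Int :=
  tags.foldl (fun a t => if pvTp t < a then pvTp t else a) i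

lemma fold_canon (tags : List String) (p : Int) :
    tags.foldl (fun best t =>
        let r := pvTagRule.getD t (6, "other")
        if r.1 < best.1 then r else best) (p, pvCat p)
      = (pvM tags p, pvCat (pvM tags p)) := by
  induction tags generalizing p with
  | nil => rfl
  | cons t ts ih =>
      rw [show pvM (t :: ts) p = pvM ts (if pvTp t < p then pvTp t else p) from rfl,
          List.foldl_cons]
      have hstep : (let r := pvTagRule.getD t (6, "other")
          if r.1 < (p, pvCat p).1 then r else (p, pvCat p))
          = ((if pvTp t < p then pvTp t else p : Int),
             pvCat (if pvTp t < p then pvTp t else p)) := by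
        simp only [tagRule_canon]
        by_cases h : pvTp t < p <;> simp [h]
      rw [hstep]
      split_ifs <;> exact ih _

lemma pvM_le_init (tags : List String) (i : Int) : pvM tags i ≤ i := by
  induction tags generalizing i with
  | nil => simp [pvM]
  | cons t ts ih =>
      simp only [pvM, List.foldl_cons]
      split_ifs with h
      · exact le_trans (ih _) (le_of_lt h)
      · exact ih i

lemma pvM_le_mem (tags : List String) (i : Int) (t : String) (ht : t ∈ tags) : pvM tags i ≤ pvTp t := by
  induction tags generalizing i with
  | nil => cases ht
  | cons u ts ih =>
      simp only [pvM, List.foldl_cons]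
      rcases List.mem_cons.mp ht with h | h
      · subst h
        split_ifs with hlt
        · exact pvM_le_init ts _
        · exact le_trans (pvM_le_init ts _) (le_of_not_gt hlt)
      · split_ifs <;> exact ih _ h

lemma pvM_achieved (tags : List String) (i : Int) :
    pvM tags i = i ∨ ∃ t ∈ tags, pvM tags i = pvTp t := by
  induction tags generalizing i with
  | nil => exact Or.inl rfl
  | cons u ts ih =>
      simp only [pvM, List.foldl_cons]
      split_ifs with h
      · rcases ih (pvTp u) with h1 | ⟨t, ht, h2⟩
        · exact Or.inr ⟨u, List.mem_cons_self, h1⟩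
        · exact Or.inr ⟨t, List.mem_cons_of_mem _ ht, h2⟩
      · rcases ih i with h1 | ⟨t, ht, h2⟩
        · exact Or.inl h1
        · exact Or.inr ⟨t, List.mem_cons_of_mem _ ht, h2⟩

lemma any_contains_iff (gs tags : List String) :
    (gs.any (fun g => tags.contains g)) = true ↔ ∃ t ∈ tags, t ∈ gs := by
  simp only [List.any_eq_true, List.contains_iff_mem]
  exact ⟨fun ⟨g, hg, ht⟩ => ⟨g, ht, hg⟩, fun ⟨t, ht, hg⟩ => ⟨t, hg, ht⟩⟩

-- the cascade of A computes the canonical category of the minimal priority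
lemma cascade_eq (tags : List String) (subject : String) :
    (if ["IGETC-1A", "IGETC-1B", "7CP-English"].any (fun tag => tags.contains tag) then "english"
     else if (["IGETC-2", "7CP-Math", "GE-B4"].any (fun tag => tags.contains tag)) || subject == "MATH" then "math"
     else if tags.contains "Major Prep" || ["CS", "CIS", "COMP"].contains subject then "major"
     else if ["IGETC-5A", "IGETC-5B", "IGETC-5C", "7CP-Science"].any (fun tag => tags.contains tag) then "science"
     else if ["IGETC-3A", "7CP-Arts"].any (fun tag => tags.contains tag) then "arts"
     else if ["IGETC-4", "7CP-Social"].any (fun tag => tags.contains tag) then "social"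
     else "other")
    = pvCat (pvM tags (pvSp subject)) := by
  have hach := pvM_achieved tags (pvSp subject)
  have hinit := pvM_le_init tags (pvSp subject)
  have hlemem : ∀ t ∈ tags, pvM tags (pvSp subject) ≤ pvTp t :=
    fun t ht => pvM_le_mem tags (pvSp subject) t ht
  have hsp := sp_cases subject
  have e0 : (["IGETC-1A", "IGETC-1B", "7CP-English"].any (fun tag => tags.contains tag)) = true
      ↔ ∃ t ∈ tags, pvTp t = 0 := by
    rw [any_contains_iff]
    exact ⟨fun ⟨t, ht, hg⟩ => ⟨t, ht, (tp_eq_zero_iff t).mpr hg⟩,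
           fun ⟨t, ht, hg⟩ => ⟨t, ht, (tp_eq_zero_iff t).mp hg⟩⟩
  have e1 : ((["IGETC-2", "7CP-Math", "GE-B4"].any (fun tag => tags.contains tag)) || subject == "MATH") = true
      ↔ (∃ t ∈ tags, pvTp t = 1) ∨ pvSp subject = 1 := by
    rw [Bool.or_eq_true, any_contains_iff, beq_iff_eq, ← sp_eq_one_iff]
    constructor
    · rintro (⟨t, ht, hg⟩ | h)
      · exact Or.inl ⟨t, ht, (tp_eq_one_iff t).mpr hg⟩
      · exact Or.inr h
    · rintro (⟨t, ht, hg⟩ | h)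
      · exact Or.inl ⟨t, ht, (tp_eq_one_iff t).mp hg⟩
      · exact Or.inr h
  have e2 : (tags.contains "Major Prep" || ["CS", "CIS", "COMP"].contains subject) = true
      ↔ (∃ t ∈ tags, pvTp t = 2) ∨ pvSp subject = 2 := by
    rw [Bool.or_eq_true, List.contains_iff_mem, List.contains_iff_mem, ← sp_eq_two_iff]
    constructor
    · rintro (h | h)
      · exact Or.inl ⟨_, h, (tp_eq_two_iff _).mpr rfl⟩
      · exact Or.inr h
    · rintro (⟨t, ht, hg⟩ | h)
      · rw [tp_eq_two_iff] at hg; subst hg; exact Or.inl ht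
      · exact Or.inr h
  have e3 : (["IGETC-5A", "IGETC-5B", "IGETC-5C", "7CP-Science"].any (fun tag => tags.contains tag)) = true
      ↔ ∃ t ∈ tags, pvTp t = 3 := by
    rw [any_contains_iff]
    exact ⟨fun ⟨t, ht, hg⟩ => ⟨t, ht, (tp_eq_three_iff t).mpr hg⟩,
           fun ⟨t, ht, hg⟩ => ⟨t, ht, (tp_eq_three_iff t).mp hg⟩⟩
  have e4 : (["IGETC-3A", "7CP-Arts"].any (fun tag => tags.contains tag)) = true
      ↔ ∃ t ∈ tags, pvTp t = 4 := by
    rw [any_contains_iff]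
    exact ⟨fun ⟨t, ht, hg⟩ => ⟨t, ht, (tp_eq_four_iff t).mpr hg⟩,
           fun ⟨t, ht, hg⟩ => ⟨t, ht, (tp_eq_four_iff t).mp hg⟩⟩
  have e5 : (["IGETC-4", "7CP-Social"].any (fun tag => tags.contains tag)) = true
      ↔ ∃ t ∈ tags, pvTp t = 5 := by
    rw [any_contains_iff]
    exact ⟨fun ⟨t, ht, hg⟩ => ⟨t, ht, (tp_eq_five_iff t).mpr hg⟩,
           fun ⟨t, ht, hg⟩ => ⟨t, ht, (tp_eq_five_iff t).mp hg⟩⟩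
  have htp_range : ∀ t ∈ tags, 0 ≤ pvTp t ∧ pvTp t ≤ 6 := fun t _ => tp_range t
  generalize hgen : pvM tags (pvSp subject) = m at hach hinit hlemem ⊢
  have hm0 : 0 ≤ m := by
    (try clear e0); (try clear e1); (try clear e2); (try clear e3); (try clear e4); (try clear e5)
    rcases hach with h | ⟨t, ht, h⟩
    · omega
    · have := (tp_range t).1; omega
  split_ifs with h0 h1 h2 h3 h4 h5
  · -- english : m = 0
    obtain ⟨t, ht, hp⟩ := e0.mp h0
    (try clear e0); (try clear e1); (try clear e2); (try clear e3); (try clear e4); (try clear e5); (try clear hach)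
    have := hlemem t ht
    have hm : m = 0 := by omega
    rw [hm]; rfl
  · -- math : m = 1
    rw [e0] at h0; push_neg at h0
    have hub : m ≤ 1 := by
      rcases e1.mp h1 with ⟨t, ht, hp⟩ | h
      · have := hlemem t ht; (try clear e0); (try clear e1); (try clear e2); (try clear e3); (try clear e4); (try clear e5); (try clear hach); omega
      · clear e0 e1 e2 e3 e4 e5 hach; omega
    have hne0 : m ≠ 0 := by
      (try clear e0); (try clear e1); (try clear e2); (try clear e3); (try clear e4); (try clear e5)
      rcases hach with h | ⟨t, ht, h⟩
      · omega
      · intro hc; exact h0 t ht (by omega)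
    have hm : m = 1 := by omega
    rw [hm]; rfl
  · -- major : m = 2
    rw [e0] at h0; push_neg at h0
    rw [e1] at h1; push_neg at h1
    obtain ⟨h1a, h1b⟩ := h1
    have hub : m ≤ 2 := by
      rcases e2.mp h2 with ⟨t, ht, hp⟩ | h
      · have := hlemem t ht; (try clear e0); (try clear e1); (try clear e2); (try clear e3); (try clear e4); (try clear e5); (try clear hach); omega
      · clear e0 e1 e2 e3 e4 e5 hach; omega
    have hne : m ≠ 0 ∧ m ≠ 1 := by
      (try clear e0); (try clear e1); (try clear e2); (try clear e3); (try clear e4); (try clear e5)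
      rcases hach with h | ⟨t, ht, h⟩
      · omega
      · exact ⟨fun hc => h0 t ht (by omega), fun hc => h1a t ht (by omega)⟩
    have hm : m = 2 := by omega
    rw [hm]; rfl
  · -- science : m = 3
    rw [e0] at h0; push_neg at h0
    rw [e1] at h1; push_neg at h1
    rw [e2] at h2; push_neg at h2
    obtain ⟨h1a, h1b⟩ := h1
    obtain ⟨h2a, h2b⟩ := h2
    obtain ⟨t0, ht0, hp0⟩ := e3.mp h3
    clear e3
    have hub := hlemem t0 ht0
    have hne : m ≠ 0 ∧ m ≠ 1 ∧ m ≠ 2 := by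
      (try clear e0); (try clear e1); (try clear e2); (try clear e3); (try clear e4); (try clear e5)
      rcases hach with h | ⟨t, ht, h⟩
      · omega
      · exact ⟨fun hc => h0 t ht (by omega), fun hc => h1a t ht (by omega),
               fun hc => h2a t ht (by omega)⟩
    have hm : m = 3 := by omega
    rw [hm]; rfl
  · -- arts : m = 4
    rw [e0] at h0; push_neg at h0
    rw [e1] at h1; push_neg at h1
    rw [e2] at h2; push_neg at h2
    rw [e3] at h3; push_neg at h3
    obtain ⟨h1a, h1b⟩ := h1
    obtain ⟨h2a, h2b⟩ := h2
    obtain ⟨t0, ht0, hp0⟩ := e4.mp h4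
    clear e4
    have hub := hlemem t0 ht0
    have hne : m ≠ 0 ∧ m ≠ 1 ∧ m ≠ 2 ∧ m ≠ 3 := by
      (try clear e0); (try clear e1); (try clear e2); (try clear e3); (try clear e4); (try clear e5)
      rcases hach with h | ⟨t, ht, h⟩
      · omega
      · exact ⟨fun hc => h0 t ht (by omega), fun hc => h1a t ht (by omega),
               fun hc => h2a t ht (by omega), fun hc => h3 t ht (by omega)⟩
    have hm : m = 4 := by omega
    rw [hm]; rfl
  · -- social : m = 5
    rw [e0] at h0; push_neg at h0
    rw [e1] at h1; push_neg at h1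
    rw [e2] at h2; push_neg at h2
    rw [e3] at h3; push_neg at h3
    rw [e4] at h4; push_neg at h4
    obtain ⟨h1a, h1b⟩ := h1
    obtain ⟨h2a, h2b⟩ := h2
    obtain ⟨t0, ht0, hp0⟩ := e5.mp h5
    clear e5
    have hub := hlemem t0 ht0
    have hne : m ≠ 0 ∧ m ≠ 1 ∧ m ≠ 2 ∧ m ≠ 3 ∧ m ≠ 4 := by
      (try clear e0); (try clear e1); (try clear e2); (try clear e3); (try clear e4); (try clear e5)
      rcases hach with h | ⟨t, ht, h⟩
      · omega
      · exact ⟨fun hc => h0 t ht (by omega), fun hc => h1a t ht (by omega),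
               fun hc => h2a t ht (by omega), fun hc => h3 t ht (by omega),
               fun hc => h4 t ht (by omega)⟩
    have hm : m = 5 := by omega
    rw [hm]; rfl
  · -- other : m = 6
    rw [e0] at h0; push_neg at h0
    rw [e1] at h1; push_neg at h1
    rw [e2] at h2; push_neg at h2
    rw [e3] at h3; push_neg at h3
    rw [e4] at h4; push_neg at h4
    rw [e5] at h5; push_neg at h5
    obtain ⟨h1a, h1b⟩ := h1
    obtain ⟨h2a, h2b⟩ := h2
    have hm : m = 6 := by
      (try clear e0); (try clear e1); (try clear e2); (try clear e3); (try clear e4); (try clear e5)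
      rcases hach with h | ⟨t, ht, h⟩
      · omega
      · have hr := htp_range t ht
        have n0 := h0 t ht
        have n1 := h1a t ht
        have n2 := h2a t ht
        have n3 := h3 t ht
        have n4 := h4 t ht
        have n5 := h5 t ht
        omega
    rw [hm]; rfl

-- ===== VERDICT (by name: the statement is the Claim_ definition above) =====
theorem get_course_category_py_spec : Claim_equal_get_course_category_py := by
  intro cc cd _ _
  unfold Spec_get_course_category_py
  simp only [get_course_category_py, get_course_category_py_alt, subjRule_canon, fold_canon,
    cascade_eq]
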